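-- pv_equiv track=rewrite | github.com/zzaizzai/Algorithm-Study | Python/baekjoon/1037.py | check
-- ===== SOURCE A (Python) =====
-- def check(num: int, divisors: list[int]) -> bool:
--
--     if num in divisors:
--         return False
--
--     for i in range(2, max(divisors)):
--         if (num %  i != 0) and (i in divisors):
--             return False
--         if (num % i == 0) and (i not in divisors):
--             return False
--
--     return True
-- ===== SOURCE B (Python) =====
-- def check(num: int, divisors: list[int]) -> bool:
--     # Enumerate num's divisors in [2, max(divisors)) by trial division up to
--     # sqrt(|num|) and compare them, as a set, with the given divisors in [2, max).
--     M = max(divisors)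
--     ds = set(divisors)
--     if num in ds:
--         return False
--     expected = {d for d in divisors if 2 <= d < M}
--     if num == 0:
--         actual = set(range(2, M))  # 0 is divisible by everything
--     else:
--         n = abs(num)
--         actual = set()
--         i = 1
--         while i * i <= n:
--             if n % i == 0:
--                 for d in (i, n // i):
--                     if 2 <= d < M:
--                         actual.add(d)
--             i += 1
--     return actual == expected
-- ===== Notes on version B (the rewrite author's own statement) =====
-- stated objective: alternative
-- what changed: A scans every candidate i in range(2, max(divisors)) with a membership test per step; B instead enumerates num's divisors directly by trial division up to sqrt(|num|) (collecting both factors of each pair) and compares that set against the set of given divisors restricted to [2, max).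
import Mathlib
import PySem

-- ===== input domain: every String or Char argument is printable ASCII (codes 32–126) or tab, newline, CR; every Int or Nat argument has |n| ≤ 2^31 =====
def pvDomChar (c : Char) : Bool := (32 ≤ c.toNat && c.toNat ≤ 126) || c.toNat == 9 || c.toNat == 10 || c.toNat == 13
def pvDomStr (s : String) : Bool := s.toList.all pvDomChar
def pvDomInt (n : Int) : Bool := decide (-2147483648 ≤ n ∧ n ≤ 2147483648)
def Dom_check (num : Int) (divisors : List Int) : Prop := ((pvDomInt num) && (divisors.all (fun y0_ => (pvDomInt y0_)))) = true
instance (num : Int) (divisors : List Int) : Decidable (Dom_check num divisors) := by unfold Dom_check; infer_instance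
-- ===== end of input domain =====

-- B replaces A's full scan of range(2, max(divisors)) by trial division up to sqrt(|num|),
-- comparing the resulting divisor set against the given divisors in [2, max) (objective: alternative).


-- ===== PORT A =====
-- the 'for i in range(2, max(divisors))' loop with its two early returns
-- (range is iterated lazily, as in Python: i counts up from 2 while i < m)
def checkLoop (num : Int) (divisors : List Int) (m i : Int) : Bool :=
  if i < m then
    if PySem.Int.mod num i ≠ 0 ∧ i ∈ divisors then false
    else if PySem.Int.mod num i = 0 ∧ i ∉ divisors then false
    else checkLoop num divisors m (i + 1)
  else true
termination_by (m - i).toNat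

def check (num : Int) (divisors : List Int) : Bool :=
  if num ∈ divisors then false
  else
    match PySem.List.max? divisors (fun x => x) with
    | none => false   -- max([]) raises ValueError; excluded by Pre_check
    | some m => checkLoop num divisors m 2

-- ===== PORT B =====
-- termination helper for the 'while i * i <= n' loop (cited by decreasing_by)
theorem whileMeasure_lt {n i : Int} (h : i * i ≤ n) :
    (n + 1 - (i + 1)).toNat < (n + 1 - i).toNat := by
  have hi : i ≤ n := by nlinarith [sq_nonneg i, sq_nonneg (i - 1)]
  omega

-- 'while i * i <= n: if n % i == 0: for d in (i, n // i): if 2 <= d < M: actual.add(d); i += 1'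
def altLoop (n M : Int) (i : Int) (acc : PySem.Set Int) : PySem.Set Int :=
  if h : i * i ≤ n then
    let acc' :=
      if PySem.Int.mod n i = 0 then
        [i, PySem.Int.floordiv n i].foldl
          (fun a d => if 2 ≤ d ∧ d < M then PySem.Set.add a d else a) acc
      else acc
    altLoop n M (i + 1) acc'
  else acc
termination_by (n + 1 - i).toNat
decreasing_by exact whileMeasure_lt h

def check_alt (num : Int) (divisors : List Int) : Bool :=
  match PySem.List.max? divisors (fun x => x) with
  | none => false   -- max([]) raises ValueError; excluded by Pre_check
  | some m =>
    let ds := PySem.Set.ofList divisors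
    if PySem.Set.contains ds num then false
    else
      let expected := PySem.Set.ofList (divisors.filter (fun d => decide (2 ≤ d ∧ d < m)))
      let actual :=
        if num = 0 then PySem.Set.ofList (PySem.List.pyRange 2 m 1)
        else altLoop (num.natAbs : Int) m 1 PySem.Set.empty
      PySem.Set.equal actual expected

-- ===== PRECONDITION & SPEC =====
-- Pre_ excludes only the empty divisor list, on which A's max([]) raises ValueError.
def Pre_check (num : Int) (divisors : List Int) : Prop := divisors ≠ []
instance (num : Int) (divisors : List Int) : Decidable (Pre_check num divisors) := by unfold Pre_check; infer_instance
def pvWitness_check : Int × List Int := (8, [2, 4, 8])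

def Spec_check (num : Int) (divisors : List Int) (out : Bool) : Prop := out = check_alt num divisors
instance (num : Int) (divisors : List Int) (out : Bool) : Decidable (Spec_check num divisors out) := by unfold Spec_check; infer_instance

-- ===== CLAIM (what is proved, stated in full; the proofs are below) =====
def Claim_equal_check : Prop := ∀ (num : Int) (divisors : List Int), Dom_check num divisors → Pre_check num divisors → Spec_check num divisors (check num divisors)

-- ===== LEMMAS AND PROOFS =====

-- A's loop returns True iff every remaining candidate passes both tests
theorem checkLoop_iff (num : Int) (divisors : List Int) (m i : Int) :
    checkLoop num divisors m i = true ↔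
      ∀ j, i ≤ j → j < m → (PySem.Int.mod num j = 0 ↔ j ∈ divisors) := by
  fun_induction checkLoop num divisors m i with
  | case1 i hlt h1 =>
    simp only [Bool.false_eq_true, false_iff]
    intro hall
    exact absurd ((hall i le_rfl hlt).mpr h1.2) h1.1
  | case2 i hlt h1 h2 =>
    simp only [Bool.false_eq_true, false_iff]
    intro hall
    exact absurd ((hall i le_rfl hlt).mp h2.1) h2.2
  | case3 i hlt h1 h2 ih =>
    rw [ih]
    constructor
    · intro hall j hij hjm
      rcases eq_or_lt_of_le hij with rfl | hgt
      · constructor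
        · intro hz; by_contra hmem; exact h2 ⟨hz, hmem⟩
        · intro hmem; by_contra hz; exact h1 ⟨hz, hmem⟩
      · exact hall j (by omega) hjm
    · intro hall j hij hjm
      exact hall j (by omega) hjm
  | case4 i hge =>
    simp only [true_iff]
    intro j hij hjm
    omega
-- membership after 'if 2 <= d < M: actual.add(d)'
theorem mem_condAdd (a : PySem.Set Int) (d x M : Int) :
    x ∈ (if _h : 2 ≤ d ∧ d < M then PySem.Set.add a d else a) ↔
      x ∈ a ∨ (x = d ∧ 2 ≤ d ∧ d < M) := by
  split_ifs with h <;> simp [PySem.Set.mem_add] <;> tauto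

-- membership in B's trial-division accumulator
theorem altLoop_mem (n M : Int) (i : Int) (acc : PySem.Set Int) (x : Int) :
    1 ≤ i → (x ∈ altLoop n M i acc ↔
      x ∈ acc ∨ ∃ j, i ≤ j ∧ j * j ≤ n ∧ PySem.Int.mod n j = 0 ∧
        (x = j ∨ x = PySem.Int.floordiv n j) ∧ 2 ≤ x ∧ x < M) := by
  fun_induction altLoop n M i acc with
  | case1 i acc h acc' ih =>
    intro hi
    rw [ih (by omega)]
    have hacc' : x ∈ acc' ↔ x ∈ acc ∨
        (PySem.Int.mod n i = 0 ∧ (x = i ∨ x = PySem.Int.floordiv n i) ∧ 2 ≤ x ∧ x < M) := by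
      show x ∈ (if PySem.Int.mod n i = 0 then _ else acc) ↔ _
      split_ifs with hm
      · simp only [List.foldl, mem_condAdd]
        constructor
        · rintro ((hx | ⟨rfl, hb⟩) | ⟨rfl, hb⟩)
          · exact Or.inl hx
          · exact Or.inr ⟨hm, Or.inl rfl, hb⟩
          · exact Or.inr ⟨hm, Or.inr rfl, hb⟩
        · rintro (hx | ⟨-, (rfl | rfl), hb⟩)
          · exact Or.inl (Or.inl hx)
          · exact Or.inl (Or.inr ⟨rfl, hb⟩)
          · exact Or.inr ⟨rfl, hb⟩
      · tauto
    rw [hacc']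
    constructor
    · rintro ((hx | hcond) | ⟨j, hj, rest⟩)
      · exact Or.inl hx
      · exact Or.inr ⟨i, le_refl i, h, hcond⟩
      · exact Or.inr ⟨j, by omega, rest⟩
    · rintro (hx | ⟨j, hij, hjj, hmod, hxd, hxb⟩)
      · exact Or.inl (Or.inl hx)
      · rcases eq_or_lt_of_le hij with rfl | hlt
        · exact Or.inl (Or.inr ⟨hmod, hxd, hxb⟩)
        · exact Or.inr ⟨j, by omega, hjj, hmod, hxd, hxb⟩
  | case2 i acc h =>
    intro hi
    constructor
    · exact Or.inl
    · rintro (hx | ⟨j, hij, hjj, -⟩)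
      · exact hx
      · exfalso; nlinarith

-- the sqrt-bounded factor-pair enumeration hits exactly the divisors of n
theorem pair_iff_dvd (n x : Int) (hn : 1 ≤ n) (hx : 2 ≤ x) :
    (∃ j, 1 ≤ j ∧ j * j ≤ n ∧ PySem.Int.mod n j = 0 ∧
        (x = j ∨ x = PySem.Int.floordiv n j)) ↔ x ∣ n := by
  constructor
  · rintro ⟨j, hj1, hjj, hm, (hxj | hxdiv)⟩
    · rw [hxj]; exact (PySem.Int.mod_eq_zero_iff_dvd n j).mp hm
    · have hjd : j ∣ n := (PySem.Int.mod_eq_zero_iff_dvd n j).mp hm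
      obtain ⟨c, hc⟩ := hjd
      rw [PySem.Int.floordiv_eq_ediv_of_pos (by omega)] at hxdiv
      subst hxdiv
      rw [hc, Int.mul_ediv_cancel_left _ (by omega)]
      exact ⟨j, by ring⟩
  · intro hdvd
    obtain ⟨c, hc⟩ := hdvd
    have hc1 : 1 ≤ c := by nlinarith
    by_cases hxx : x * x ≤ n
    · exact ⟨x, by omega, hxx, (PySem.Int.mod_eq_zero_iff_dvd n x).mpr ⟨c, hc⟩, Or.inl rfl⟩
    · refine ⟨c, hc1, by nlinarith, (PySem.Int.mod_eq_zero_iff_dvd n c).mpr ⟨x, by linarith [hc]⟩, Or.inr ?_⟩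
      rw [PySem.Int.floordiv_eq_ediv_of_pos (by omega), hc, Int.mul_ediv_cancel _ (by omega)]

-- mod num i = 0 iff i divides |num|, for positive i
theorem mod_zero_iff_dvd_natAbs (num i : Int) :
    PySem.Int.mod num i = 0 ↔ i ∣ (num.natAbs : Int) := by
  rw [PySem.Int.mod_eq_zero_iff_dvd, Int.dvd_natAbs]

-- ===== VERDICT (by name: the statement is the Claim_ definition above) =====
theorem check_spec : Claim_equal_check := by
  intro num divisors _ hpre
  unfold Spec_check check check_alt
  obtain ⟨m, hm⟩ : ∃ m, PySem.List.max? divisors (fun x => x) = some m := by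
    cases hmx : PySem.List.max? divisors (fun x => x) with
    | none => exact absurd ((PySem.List.max?_eq_none_iff _ _).mp hmx) hpre
    | some m => exact ⟨m, rfl⟩
  rw [hm]
  by_cases hmem : num ∈ divisors
  · simp [hmem, PySem.Set.mem_ofList]
  · have hcon : ¬ (PySem.Set.contains (PySem.Set.ofList divisors) num = true) := by
      simp only [PySem.Set.contains_iff, PySem.Set.mem_ofList]; exact hmem
    rw [if_neg hmem, Bool.eq_iff_iff]
    simp only [if_neg hcon, checkLoop_iff, PySem.Set.equal_iff]
    have hexp : ∀ x : Int,
        x ∈ PySem.Set.ofList (divisors.filter (fun d => decide (2 ≤ d ∧ d < m))) ↔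
          x ∈ divisors ∧ 2 ≤ x ∧ x < m := by
      intro x; simp [PySem.Set.mem_ofList, List.mem_filter]
    by_cases h0 : num = 0
    · subst h0
      simp only [if_true]
      constructor
      · intro hA x
        rw [hexp, PySem.Set.mem_ofList, PySem.List.mem_pyRange_one]
        constructor
        · intro hx
          exact ⟨(hA x hx.1 hx.2).mp
            ((PySem.Int.mod_eq_zero_iff_dvd 0 x).mpr (dvd_zero x)), hx⟩
        · exact And.right
      · intro hB i hi1 hi2
        have hx := hB i
        rw [hexp, PySem.Set.mem_ofList, PySem.List.mem_pyRange_one] at hx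
        constructor
        · intro _; exact (hx.mp ⟨hi1, hi2⟩).1
        · intro _; exact (PySem.Int.mod_eq_zero_iff_dvd 0 i).mpr (dvd_zero i)
    · simp only [if_neg h0]
      have hn : (1:Int) ≤ (num.natAbs : Int) := by
        have := Int.natAbs_pos.mpr h0; omega
      have hact : ∀ x : Int,
          x ∈ altLoop (num.natAbs : Int) m 1 PySem.Set.empty ↔
            (2 ≤ x ∧ x < m) ∧ x ∣ (num.natAbs : Int) := by
        intro x
        rw [altLoop_mem _ _ _ _ _ le_rfl]
        constructor
        · rintro (hx | ⟨j, hj, hjj, hmod, hxd, hxb⟩)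
          · cases hx
          · exact ⟨hxb, (pair_iff_dvd _ x hn hxb.1).mp ⟨j, hj, hjj, hmod, hxd⟩⟩
        · rintro ⟨hxb, hdvd⟩
          obtain ⟨j, hj1, hjj, hmod, hxd⟩ := (pair_iff_dvd _ x hn hxb.1).mpr hdvd
          exact Or.inr ⟨j, hj1, hjj, hmod, hxd, hxb⟩
      constructor
      · intro hA x
        rw [hact, hexp]
        constructor
        · rintro ⟨hxb, hdvd⟩
          exact ⟨(hA x hxb.1 hxb.2).mp
            ((mod_zero_iff_dvd_natAbs num x).mpr hdvd), hxb⟩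
        · rintro ⟨hxd, hxb⟩
          exact ⟨hxb, (mod_zero_iff_dvd_natAbs num x).mp
            ((hA x hxb.1 hxb.2).mpr hxd)⟩
      · intro hB i hi1 hi2
        have hx := hB i
        rw [hact, hexp] at hx
        constructor
        · intro hmod
          exact (hx.mp ⟨⟨hi1, hi2⟩, (mod_zero_iff_dvd_natAbs num i).mp hmod⟩).1
        · intro hid
          exact (mod_zero_iff_dvd_natAbs num i).mpr (hx.mpr ⟨hid, hi1, hi2⟩).2
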